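-- pv_equiv track=rewrite | github.com/VetEngineer/Agents-team | keyword-generator/main.py | filter_pois
-- ===== SOURCE A (Python) =====
-- from typing import Dict, Iterable, List, Optional, Sequence, Tuple
--
-- def filter_pois(pois: Iterable[str], address_terms: Sequence[str]) -> List[str]:
--     address_set = set(address_terms)
--     filtered = []
--     for poi in pois:
--         if not poi:
--             continue
--         if any(term in poi for term in address_set):
--             continue
--         filtered.append(poi)
--     return list(dict.fromkeys(filtered))
-- ===== SOURCE B (Python) =====
-- def filter_pois(pois, address_terms):
--     result = []
--     for poi in reversed(list(pois)):
--         if poi and not any(t in poi for t in address_terms):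
--             result = [poi] + [x for x in result if x != poi]
--     return result
-- ===== Notes on version B (the rewrite author's own statement) =====
-- stated objective: alternative
-- what changed: B traverses the input back-to-front and dedups by deleting later duplicates out of the already-built suffix result when their first occurrence is reached, with no seen-set and no dict.fromkeys pass; first-occurrence order is preserved because the first occurrence is processed last.
import Mathlib
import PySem

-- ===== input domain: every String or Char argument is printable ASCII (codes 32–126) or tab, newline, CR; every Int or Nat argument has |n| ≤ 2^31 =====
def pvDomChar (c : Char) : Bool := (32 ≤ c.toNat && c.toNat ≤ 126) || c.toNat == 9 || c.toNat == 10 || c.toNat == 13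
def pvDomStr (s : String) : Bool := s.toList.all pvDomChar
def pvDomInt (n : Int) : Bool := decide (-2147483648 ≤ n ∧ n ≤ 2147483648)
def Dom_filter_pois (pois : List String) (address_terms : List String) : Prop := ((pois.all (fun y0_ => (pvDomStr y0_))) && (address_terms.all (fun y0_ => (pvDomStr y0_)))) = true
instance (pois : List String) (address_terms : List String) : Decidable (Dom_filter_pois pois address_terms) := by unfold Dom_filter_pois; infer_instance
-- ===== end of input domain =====

-- B traverses the input back-to-front and dedups by deleting later duplicates out of the
-- already-built suffix result, with no seen-set and no dict.fromkeys pass (objective: alternative).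

-- ===== PORT A =====
def filter_pois (pois : List String) (address_terms : List String) : List String :=
  let address_set := PySem.Set.ofList address_terms
  let filtered := pois.foldl (fun acc poi =>
    if poi == "" then acc
    else if address_set.any (fun term => PySem.Str.isIn term poi) then acc
    else acc ++ [poi]) []
  PySem.List.dedup filtered

-- ===== PORT B =====
def filter_pois_alt (pois : List String) (address_terms : List String) : List String :=
  (pois.reverse).foldl (fun result poi =>
    if poi != "" && !(address_terms.any (fun t => PySem.Str.isIn t poi)) then
      poi :: result.filter (fun x => x != poi)
    else result) []

-- ===== PRECONDITION & SPEC =====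
def Spec_filter_pois (pois : List String) (address_terms : List String) (out : List String) : Prop := out = filter_pois_alt pois address_terms
instance (pois : List String) (address_terms : List String) (out : List String) : Decidable (Spec_filter_pois pois address_terms out) := by unfold Spec_filter_pois; infer_instance

-- ===== CLAIM (what is proved, stated in full; the proofs are below) =====
def Claim_equal_filter_pois : Prop := ∀ (pois : List String) (address_terms : List String), Dom_filter_pois pois address_terms → Spec_filter_pois pois address_terms (filter_pois pois address_terms)

-- ===== LEMMAS AND PROOFS =====

-- the "poi survives the skips" predicate, with the term test abstracted as q
def pvKeep (q : String → Bool) (poi : String) : Bool := poi != "" && !(q poi)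

-- ordered first-occurrence dedup, written as "strip my duplicates out of the deduped tail"
def pvRmDup : List String → List String
  | [] => []
  | h :: t => h :: (pvRmDup t).filter (fun x => x != h)

-- filtering commutes with pvRmDup
theorem pvRmDup_filter (p : String → Bool) (l : List String) :
    pvRmDup (l.filter p) = (pvRmDup l).filter p := by
  induction l with
  | nil => rfl
  | cons h t ih =>
    rcases hp : p h with _ | _
    · simp only [List.filter_cons, hp, Bool.false_eq_true, if_false, pvRmDup, ih,
        List.filter_filter]
      refine (List.filter_congr (fun x _ => ?_)).symm
      rcases hx : p x with _ | _
      · simp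
      · have hxh : (x != h) = true := by
          rcases eq_or_ne x h with rfl | hne
          · rw [hp] at hx; exact absurd hx (by simp)
          · simpa using hne
        simp [hxh]
    · simp only [List.filter_cons, hp, if_true, pvRmDup, ih, List.filter_filter]
      congr 1
      exact List.filter_congr (fun x _ => by rw [Bool.and_comm])

-- folding Set.add over a list, from a deduplicated seed
theorem pvFoldl_add (l : List String) (s : PySem.Set String) :
    l.foldl PySem.Set.add s
      = s ++ pvRmDup (l.filter (fun x => !(PySem.Set.contains s x))) := by
  induction l generalizing s with
  | nil => simp [pvRmDup]
  | cons h t ih =>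
    by_cases hc : PySem.Set.contains s h = true
    · have hm : h ∈ s := by have hc' := hc; simp [PySem.Set.contains] at hc'; exact hc'
      have hadd : PySem.Set.add s h = s := by simp [PySem.Set.add, hm]
      rw [List.foldl_cons, hadd, ih, List.filter_cons, if_neg (by simp [PySem.Set.contains, hm])]
    · have hm : h ∉ s := by
        intro hmem; exact hc (by simp [PySem.Set.contains, hmem])
      have hadd : PySem.Set.add s h = s ++ [h] := by simp [PySem.Set.add, hm]
      rw [List.foldl_cons, hadd, ih, List.filter_cons, if_pos (by simp [PySem.Set.contains, hm])]
      have hconts : ∀ x, PySem.Set.contains (s ++ [h]) x = (PySem.Set.contains s x || x == h) := by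
        intro x; simp [PySem.Set.contains, beq_eq_decide]
      have hfl : t.filter (fun x => !(PySem.Set.contains (s ++ [h]) x))
          = (t.filter (fun x => !(PySem.Set.contains s x))).filter (fun x => x != h) := by
        rw [List.filter_filter]
        exact List.filter_congr (fun x _ => by
          rw [hconts x]
          cases PySem.Set.contains s x <;> cases hxy : (x == h) <;> simp [bne, hxy])
      rw [hfl, pvRmDup_filter, List.append_assoc]
      rfl

-- Python's ordered dedup is pvRmDup
theorem pvDedup_eq_rmDup (l : List String) : PySem.List.dedup l = pvRmDup l := by
  have := pvFoldl_add l []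
  simp only [PySem.List.dedup_eq_ofList, PySem.Set.ofList_eq_foldl]
  rw [this, List.nil_append]
  congr 1
  exact List.filter_eq_self.mpr (fun x _ => by simp [PySem.Set.contains])

-- any over set(ts) = any over ts
theorem pvAny_ofList (ts : List String) (q : String → Bool) :
    (PySem.Set.ofList ts).any q = ts.any q := by
  rcases h : ts.any q with _ | _
  · refine (List.any_eq_false.mpr (fun x hx => ?_))
    exact List.any_eq_false.mp h x ((PySem.Set.mem_ofList ts x).mp hx)
  · obtain ⟨x, hx, hq⟩ := List.any_eq_true.mp h
    exact List.any_eq_true.mpr ⟨x, (PySem.Set.mem_ofList ts x).mpr hx, hq⟩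

-- A's loop builds exactly the filter by pvKeep
theorem pvA_loop (q : String → Bool) (pois : List String) (acc : List String) :
    pois.foldl (fun acc poi =>
      if poi == "" then acc
      else if q poi then acc
      else acc ++ [poi]) acc = acc ++ pois.filter (pvKeep q) := by
  induction pois generalizing acc with
  | nil => simp
  | cons p ps ih =>
    rw [List.foldl_cons, List.filter_cons]
    by_cases hpe : p = ""
    · rw [if_pos (by simp [hpe]), if_neg (by simp [pvKeep, hpe]), ih]
    · by_cases hq : q p = true
      · rw [if_neg (by simp [hpe]), if_pos hq, if_neg (by simp [pvKeep, hq]), ih]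
      · rw [if_neg (by simp [hpe]), if_neg hq, if_pos (by simp [pvKeep, hpe, hq]), ih]
        simp

-- B's backward fold computes pvRmDup of the filtered list
theorem pvB_loop (q : String → Bool) (pois : List String) :
    (pois.reverse).foldl (fun result poi =>
        if pvKeep q poi then poi :: result.filter (fun x => x != poi)
        else result) []
      = pvRmDup (pois.filter (pvKeep q)) := by
  rw [List.foldl_reverse]
  induction pois with
  | nil => rfl
  | cons p ps ih =>
    rw [List.foldr_cons, List.filter_cons, ih]
    by_cases hk : pvKeep q p = true
    · rw [if_pos hk, if_pos hk]; rfl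
    · rw [if_neg hk, if_neg hk]

-- ===== VERDICT (by name: the statement is the Claim_ definition above) =====
theorem filter_pois_spec : Claim_equal_filter_pois := by
  intro pois address_terms _
  unfold Spec_filter_pois filter_pois filter_pois_alt
  have hq : ∀ poi, (pvKeep (fun poi => (PySem.Set.ofList address_terms).any
        (fun term => PySem.Str.isIn term poi)) poi)
      = pvKeep (fun poi => address_terms.any (fun t => PySem.Str.isIn t poi)) poi := by
    intro poi; unfold pvKeep; simp only [pvAny_ofList]
  simp only [pvA_loop, pvDedup_eq_rmDup, List.nil_append]
  rw [show (fun result poi =>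
        if poi != "" && !(address_terms.any (fun t => PySem.Str.isIn t poi)) then
          poi :: result.filter (fun x => x != poi)
        else result)
      = (fun result poi =>
        if pvKeep (fun poi => address_terms.any (fun t => PySem.Str.isIn t poi)) poi then
          poi :: result.filter (fun x => x != poi)
        else result) from rfl,
     pvB_loop]
  congr 1
  exact List.filter_congr (fun x _ => hq x)
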